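-- pv_equiv track=rewrite | github.com/Fliite/Fliite | Fiche exercice1/exercice9.py | mise_en_dico
-- ===== SOURCE A (Python) =====
-- def mise_en_dico(liste):
--     #on prend en entree une liste de mots et en sortie un dictionnaire avec les mots comme cle et une liste de leur position comme valeur
--     dico = {}
--     k = 0
--     for i in liste:
--         if i not in dico:
--             dico[i] = [k]
--         else:
--             dico[i].append(k)
--         k += 1
--     return dico
-- ===== SOURCE B (Python) =====
-- def mise_en_dico(liste):
--     # idiomatic rewrite: one scan per distinct word instead of a single accumulating pass
--     return {w: [i for i, x in enumerate(liste) if x == w] for w in dict.fromkeys(liste)}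
-- ===== Notes on version B (the rewrite author's own statement) =====
-- stated objective: idiomatic
-- what changed: Replaces A's single accumulating pass over an incrementally mutated dict by first computing the distinct words (dict.fromkeys) and then, per distinct word, collecting its positions with a separate enumerate scan (a dict comprehension).
import Mathlib
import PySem

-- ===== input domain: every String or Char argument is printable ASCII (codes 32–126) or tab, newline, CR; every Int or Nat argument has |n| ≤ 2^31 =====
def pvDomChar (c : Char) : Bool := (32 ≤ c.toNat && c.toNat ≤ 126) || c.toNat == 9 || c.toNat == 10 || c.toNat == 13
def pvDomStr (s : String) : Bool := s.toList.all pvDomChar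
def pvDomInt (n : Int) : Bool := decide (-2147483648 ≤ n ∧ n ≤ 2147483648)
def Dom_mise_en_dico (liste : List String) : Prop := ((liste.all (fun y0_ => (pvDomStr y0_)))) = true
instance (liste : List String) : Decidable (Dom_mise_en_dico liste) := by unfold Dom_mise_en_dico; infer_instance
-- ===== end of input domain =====

-- B builds the result per distinct word (dict.fromkeys + one enumerate scan per word) instead of A's single accumulating pass; objective: idiomatic.

-- ===== PORT A =====
-- A's loop body: '(dico, k) ->' if word unseen insert [k], else append k; counter k incremented each step.
def pvStepA (st : PySem.Dict String (List Int) × Int) (i : String) :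
    PySem.Dict String (List Int) × Int :=
  let dico := st.1
  let k := st.2
  let dico := if dico.contains i = false then dico.insert i [k]
              else dico.modify i [] (fun l => l ++ [k])
  (dico, k + 1)

def mise_en_dico (liste : List String) : List (String × List Int) :=
  (liste.foldl pvStepA (PySem.Dict.empty, 0)).1.items

-- ===== PORT B =====
def mise_en_dico_alt (liste : List String) : List (String × List Int) :=
  (PySem.List.dedup liste).map (fun w =>
    (w, (PySem.List.enumerate liste 0).filterMap
          (fun p => if p.2 = w then some p.1 else none)))

-- ===== PRECONDITION & SPEC =====
def Spec_mise_en_dico (liste : List String) (out : List (String × List Int)) : Prop := out = mise_en_dico_alt liste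
instance (liste : List String) (out : List (String × List Int)) : Decidable (Spec_mise_en_dico liste out) := by unfold Spec_mise_en_dico; infer_instance

-- ===== CLAIM (what is proved, stated in full; the proofs are below) =====
def Claim_equal_mise_en_dico : Prop := ∀ (liste : List String), Dom_mise_en_dico liste → Spec_mise_en_dico liste (mise_en_dico liste)

-- ===== LEMMAS AND PROOFS =====

-- A's branching step is exactly a 'modify' (append to the list stored at the key, default []).
lemma pvStepA_eq_modify (d : PySem.Dict String (List Int)) (k : Int) (i : String) :
    pvStepA (d, k) i = (d.modify i [] (fun l => l ++ [k]), k + 1) := by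
  unfold pvStepA
  by_cases h : d.contains i = false
  · have hg : d.getD i [] = [] := by
      simp [PySem.Dict.getD, (PySem.Dict.get?_eq_none_iff_contains d i).mpr h]
    simp [h, PySem.Dict.modify, hg]
  · simp [h]

-- A's fold over 'liste' with the counter is the standard modify-fold over swapped enumerate pairs.
lemma pvFoldA_eq (liste : List String) (d : PySem.Dict String (List Int)) (k : Int) :
    (liste.foldl pvStepA (d, k)).1 =
      ((PySem.List.enumerate liste k).map Prod.swap).foldl
        (fun d p => d.modify p.1 [] (fun l => l ++ [p.2])) d := by
  induction liste generalizing d k with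
  | nil => simp [PySem.List.enumerate_nil]
  | cons x xs ih =>
      rw [PySem.List.enumerate_cons]
      simp only [List.foldl_cons, List.map_cons, pvStepA_eq_modify, Prod.swap]
      exact ih _ _

lemma pvFilterMap_pairs (w : String) (l : List (Int × String)) :
    (List.map (fun x => x.2) (List.filter (fun p => p.1 == w) (l.map Prod.swap))) =
      l.filterMap (fun p => if p.2 = w then some p.1 else none) := by
  induction l with
  | nil => rfl
  | cons p l ih =>
      by_cases h : p.2 = w
      · simp [h, Prod.swap, ih]
      · simp [h, Prod.swap, ih]

theorem pvEq (liste : List String) : mise_en_dico liste = mise_en_dico_alt liste := by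
  unfold mise_en_dico mise_en_dico_alt
  rw [pvFoldA_eq]
  set l := (PySem.List.enumerate liste 0).map Prod.swap with hl
  have hmap : l.map Prod.fst = liste := by
    rw [hl, List.map_map]
    simp [Function.comp_def, PySem.List.map_snd_enumerate liste (0 : Int)]
  have hkeys :
      (l.foldl (fun d p => d.modify p.1 [] (fun v => v ++ [p.2]))
        (PySem.Dict.empty : PySem.Dict String (List Int))).keys = PySem.List.dedup liste := by
    rw [PySem.Dict.keys_foldl_modify_key l Prod.fst [] (fun _ p v => v ++ [p.2]),
        PySem.Dict.keys_empty, PySem.Set.update_nil_left, hmap, PySem.List.dedup_eq_ofList]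
  have hnodup :
      (l.foldl (fun d p => d.modify p.1 [] (fun v => v ++ [p.2]))
        (PySem.Dict.empty : PySem.Dict String (List Int))).keys.Nodup := by
    apply PySem.Dict.nodup_keys_foldl_modify_key l Prod.fst [] (fun _ p v => v ++ [p.2])
    simp [PySem.Dict.keys_empty]
  rw [PySem.Dict.items_eq_map_keys _ hnodup [], hkeys]
  apply List.map_congr_left
  intro w _
  rw [PySem.Dict.getD_foldl_modify_append]
  simp only [PySem.Dict.getD_empty, List.nil_append, hl]
  exact congrArg (Prod.mk w) (pvFilterMap_pairs w _)

-- ===== VERDICT (by name: the statement is the Claim_ definition above) =====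
theorem mise_en_dico_spec : Claim_equal_mise_en_dico := by
  intro liste _
  unfold Spec_mise_en_dico
  exact pvEq liste
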